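-- pv_equiv track=rewrite | github.com/peppermintpatty5/advent2020 | 07/prog.py | countReduce
-- ===== SOURCE A (Python) =====
-- def countReduce(bag: str, bags: dict, quantities: dict) -> int:
--     if bag not in bags:
--         return 0
--     else:
--         return sum(
--             q + q * countReduce(inner, bags, quantities)
--             for q, inner in zip(quantities[bag], bags[bag])
--         )
-- ===== SOURCE B (Python) =====
-- def countReduce(bag: str, bags: dict, quantities: dict) -> int:
--     memo = {}
--
--     def go(b):
--         if b in memo:
--             return memo[b]
--         total = 0
--         if b in bags:
--             for q, inner in zip(quantities[b], bags[b]):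
--                 total += q + q * go(inner)
--         memo[b] = total
--         return total
--
--     return go(bag)
-- ===== Notes on version B (the rewrite author's own statement) =====
-- stated objective: alternative
-- what changed: B replaces A's naive recursion, which re-walks a shared sub-bag once per path reaching it, by a memoized depth-first count that computes each bag's total once and reuses it (DP over the DAG).
import Mathlib
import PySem

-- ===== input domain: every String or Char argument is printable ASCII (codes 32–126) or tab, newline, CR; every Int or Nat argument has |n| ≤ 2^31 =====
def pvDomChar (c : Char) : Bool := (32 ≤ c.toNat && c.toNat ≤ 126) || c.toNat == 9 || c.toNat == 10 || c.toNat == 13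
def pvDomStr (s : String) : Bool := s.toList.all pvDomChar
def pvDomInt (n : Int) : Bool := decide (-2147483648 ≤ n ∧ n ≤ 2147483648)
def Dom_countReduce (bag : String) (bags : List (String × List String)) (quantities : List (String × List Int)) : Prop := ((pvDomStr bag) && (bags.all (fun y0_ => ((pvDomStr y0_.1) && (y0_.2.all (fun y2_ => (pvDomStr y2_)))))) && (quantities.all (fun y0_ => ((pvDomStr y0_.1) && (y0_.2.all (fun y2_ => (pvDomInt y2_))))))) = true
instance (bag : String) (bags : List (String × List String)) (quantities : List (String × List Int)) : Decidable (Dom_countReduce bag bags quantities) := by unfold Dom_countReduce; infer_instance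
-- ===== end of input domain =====

-- B replaces A's naive recursive re-walk of shared sub-bags by a memoized depth-first
-- count (one computation per bag); equivalence of the return values is proved on Pre_.

-- ===== PORT A =====
-- A's recursion is ported with a fuel parameter (bags.length + 1), which under
-- Pre_countReduce (acyclicity of the visited graph) is never exhausted.
def pvCRF (bags : List (String × List String)) (quantities : List (String × List Int)) : Nat → String → Int
  | 0, _ => 0
  | f + 1, b =>
    match List.lookup b bags with
    | none => 0
    | some inners =>
      ((((List.lookup b quantities).getD []).zip inners).map
        (fun p => p.1 + p.1 * pvCRF bags quantities f p.2)).sum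

def countReduce (bag : String) (bags : List (String × List String)) (quantities : List (String × List Int)) : Int :=
  pvCRF bags quantities (bags.length + 1) bag

-- ===== PORT B =====
-- B's `go` with its memo dict threaded explicitly; the for-loop over the zip is pvGoLoop.
mutual
  def pvGo (bags : List (String × List String)) (quantities : List (String × List Int))
      (f : Nat) (b : String) (memo : PySem.Dict String Int) : PySem.Dict String Int × Int :=
    match PySem.Dict.get? memo b with
    | some v => (memo, v)
    | none =>
      match f with
      | 0 => (memo, 0)
      | Nat.succ f' =>
        match List.lookup b bags with
        | none => (memo.insert b 0, 0)
        | some inners =>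
          let r := pvGoLoop bags quantities f' (((List.lookup b quantities).getD []).zip inners) memo 0
          (r.1.insert b r.2, r.2)
  termination_by (f, 0)

  def pvGoLoop (bags : List (String × List String)) (quantities : List (String × List Int))
      (f : Nat) (l : List (Int × String)) (memo : PySem.Dict String Int) (total : Int) : PySem.Dict String Int × Int :=
    match l with
    | [] => (memo, total)
    | p :: rest =>
      let r := pvGo bags quantities f p.2 memo
      pvGoLoop bags quantities f rest r.1 (total + (p.1 + p.1 * r.2))
  termination_by (f, l.length + 1)
end

def countReduce_alt (bag : String) (bags : List (String × List String)) (quantities : List (String × List Int)) : Int :=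
  (pvGo bags quantities (bags.length + 1) bag PySem.Dict.empty).2

-- ===== PRECONDITION & SPEC =====
-- Helpers for Pre_: the set of bag names the recursion actually visits (keys only,
-- children truncated by zip as in A), computed as an iterated closure.
def pvKeys (bags : List (String × List String)) : List String := bags.map Prod.fst

def pvChilds (bags : List (String × List String)) (quantities : List (String × List Int)) (x : String) : List String :=
  ((((List.lookup x quantities).getD []).zip ((List.lookup x bags).getD [])).map Prod.snd)

def pvAddNew (S : List String) (xs : List String) : List String :=
  xs.foldl (fun S y => if y ∈ S then S else S ++ [y]) S

def pvKStep (bags : List (String × List String)) (quantities : List (String × List Int)) (S : List String) : List String :=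
  pvAddNew S ((S.flatMap (pvChilds bags quantities)).filter (fun y => decide (y ∈ pvKeys bags)))

def pvKClose (bags : List (String × List String)) (quantities : List (String × List Int)) (S : List String) : List String :=
  (pvKStep bags quantities)^[bags.length + 1] S

def pvKC (bags : List (String × List String)) (quantities : List (String × List Int)) (bag : String) : List String :=
  pvKClose bags quantities (if bag ∈ pvKeys bags then [bag] else [])

def pvDown (bags : List (String × List String)) (quantities : List (String × List Int)) (x : String) : List String :=
  pvKClose bags quantities [x]

-- Pre_ excludes exactly the inputs where the Python A raises: a visited bag name that is a
-- key of bags but missing from quantities (KeyError), and a cycle among the visited bags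
-- (RecursionError / divergence).
def Pre_countReduce (bag : String) (bags : List (String × List String)) (quantities : List (String × List Int)) : Prop :=
  (∀ x ∈ pvKC bags quantities bag, (List.lookup x quantities).isSome = true) ∧
  (∀ x ∈ pvKC bags quantities bag, ∀ y ∈ pvChilds bags quantities x, x ∉ pvDown bags quantities y)

instance (bag : String) (bags : List (String × List String)) (quantities : List (String × List Int)) : Decidable (Pre_countReduce bag bags quantities) := by
  unfold Pre_countReduce; infer_instance

def pvWitness_countReduce : String × (List (String × List String)) × (List (String × List Int)) :=
  ("shiny gold",
   [("shiny gold", ["dark red", "dark blue"]), ("dark red", ["dark blue"])],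
   [("shiny gold", [2, 3]), ("dark red", [4])])

def Spec_countReduce (bag : String) (bags : List (String × List String)) (quantities : List (String × List Int)) (out : Int) : Prop := out = countReduce_alt bag bags quantities
instance (bag : String) (bags : List (String × List String)) (quantities : List (String × List Int)) (out : Int) : Decidable (Spec_countReduce bag bags quantities out) := by unfold Spec_countReduce; infer_instance

-- ===== CLAIM (what is proved, stated in full; the proofs are below) =====
def Claim_equal_countReduce : Prop := ∀ (bag : String) (bags : List (String × List String)) (quantities : List (String × List Int)), Dom_countReduce bag bags quantities → Pre_countReduce bag bags quantities → Spec_countReduce bag bags quantities (countReduce bag bags quantities)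

-- ===== LEMMAS AND PROOFS =====

theorem pv_lookup_eq_none_iff {β : Type} (x : String) (l : List (String × β)) :
    List.lookup x l = none ↔ x ∉ l.map Prod.fst := by
  induction l with
  | nil => simp
  | cons p rest ih =>
    obtain ⟨k, v⟩ := p
    by_cases h : x = k
    · subst h; simp [List.lookup]
    · simp only [List.lookup]
      rw [show (x == k) = false from beq_eq_false_iff_ne.mpr h]
      simp [ih, h]

theorem pv_lookup_isSome_of_mem {β : Type} (x : String) (l : List (String × β))
    (h : x ∈ l.map Prod.fst) : (List.lookup x l).isSome = true := by
  cases hl : List.lookup x l with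
  | none => exact absurd ((pv_lookup_eq_none_iff x l).mp hl) (by simpa using h)
  | some v => rfl

theorem pv_mem_addNew (S xs : List String) (z : String) :
    z ∈ pvAddNew S xs ↔ z ∈ S ∨ z ∈ xs := by
  induction xs generalizing S with
  | nil => simp [pvAddNew]
  | cons y ys ih =>
    unfold pvAddNew at *
    by_cases hy : y ∈ S <;> simp [hy, List.foldl_cons, ih] <;> constructor <;> intro h <;> aesop

theorem pv_nodup_addNew (S xs : List String) (h : S.Nodup) : (pvAddNew S xs).Nodup := by
  induction xs generalizing S with
  | nil => simpa [pvAddNew]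
  | cons y ys ih =>
    unfold pvAddNew at *
    by_cases hy : y ∈ S
    · simpa [hy] using ih S h
    · simp only [List.foldl_cons, if_neg hy]
      have hnd : (S ++ [y]).Nodup := by
        simp [List.nodup_append, h]
        exact fun a ha he => hy (he ▸ ha)
      exact ih _ hnd

theorem pv_addNew_append (S xs : List String) : ∃ t, pvAddNew S xs = S ++ t := by
  induction xs generalizing S with
  | nil => exact ⟨[], by simp [pvAddNew]⟩
  | cons y ys ih =>
    unfold pvAddNew at *
    by_cases hy : y ∈ S
    · simpa [hy] using ih S
    · simp only [List.foldl_cons, if_neg hy]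
      obtain ⟨t, ht⟩ := ih (S ++ [y])
      exact ⟨[y] ++ t, by simp [ht]⟩


-- kstep / closure lemmas
theorem pv_subset_kstep (bags : List (String × List String)) (quantities : List (String × List Int)) (S : List String) :
    S ⊆ pvKStep bags quantities S :=
  fun z hz => (pv_mem_addNew _ _ z).mpr (Or.inl hz)

theorem pv_mem_kstep (bags : List (String × List String)) (quantities : List (String × List Int)) (S : List String) (z : String)
    (h : z ∈ pvKStep bags quantities S) :
    z ∈ S ∨ (z ∈ pvKeys bags ∧ ∃ x ∈ S, z ∈ pvChilds bags quantities x) := by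
  rcases (pv_mem_addNew _ _ z).mp h with h | h
  · exact Or.inl h
  · simp only [List.mem_filter, List.mem_flatMap, decide_eq_true_eq] at h
    exact Or.inr ⟨h.2, h.1⟩

def pvClosed (bags : List (String × List String)) (quantities : List (String × List Int)) (T : List String) : Prop :=
  ∀ x ∈ T, ∀ y ∈ pvChilds bags quantities x, y ∈ pvKeys bags → y ∈ T

theorem pv_kstep_subset (bags : List (String × List String)) (quantities : List (String × List Int)) (S T : List String)
    (hST : S ⊆ T) (hT : pvClosed bags quantities T) : pvKStep bags quantities S ⊆ T := by
  intro z hz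
  rcases pv_mem_kstep bags quantities S z hz with h | ⟨hk, x, hx, hc⟩
  · exact hST h
  · exact hT x (hST hx) z hc hk

theorem pv_kstep_keys (bags : List (String × List String)) (quantities : List (String × List Int)) (S : List String)
    (h : S ⊆ pvKeys bags) : pvKStep bags quantities S ⊆ pvKeys bags := by
  intro z hz
  rcases pv_mem_kstep bags quantities S z hz with h' | ⟨hk, _⟩
  · exact h h'
  · exact hk

theorem pv_nodup_kstep (bags : List (String × List String)) (quantities : List (String × List Int)) (S : List String)
    (h : S.Nodup) : (pvKStep bags quantities S).Nodup :=
  pv_nodup_addNew _ _ h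

theorem pv_subset_iterate (bags : List (String × List String)) (quantities : List (String × List Int)) :
    ∀ (n : Nat) (S : List String), S ⊆ (pvKStep bags quantities)^[n] S := by
  intro n
  induction n with
  | zero => intro S; simp
  | succ n ih =>
    intro S
    rw [Function.iterate_succ_apply]
    exact (pv_subset_kstep bags quantities S).trans (ih _)

theorem pv_iterate_subset (bags : List (String × List String)) (quantities : List (String × List Int)) :
    ∀ (n : Nat) (S T : List String), S ⊆ T → pvClosed bags quantities T → (pvKStep bags quantities)^[n] S ⊆ T := by
  intro n
  induction n with
  | zero => intro S T h _; simpa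
  | succ n ih =>
    intro S T h hT
    rw [Function.iterate_succ_apply]
    exact ih _ _ (pv_kstep_subset bags quantities S T h hT) hT

theorem pv_iterate_keys (bags : List (String × List String)) (quantities : List (String × List Int)) :
    ∀ (n : Nat) (S : List String), S ⊆ pvKeys bags → (pvKStep bags quantities)^[n] S ⊆ pvKeys bags := by
  intro n
  induction n with
  | zero => intro S h; simpa
  | succ n ih =>
    intro S h
    rw [Function.iterate_succ_apply]
    exact ih _ (pv_kstep_keys bags quantities S h)

theorem pv_iterate_nodup (bags : List (String × List String)) (quantities : List (String × List Int)) :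
    ∀ (n : Nat) (S : List String), S.Nodup → ((pvKStep bags quantities)^[n] S).Nodup := by
  intro n
  induction n with
  | zero => intro S h; simpa
  | succ n ih =>
    intro S h
    rw [Function.iterate_succ_apply]
    exact ih _ (pv_nodup_kstep bags quantities S h)

theorem pv_length_le (bags : List (String × List String)) (S : List String)
    (hnd : S.Nodup) (hk : S ⊆ pvKeys bags) : S.length ≤ bags.length := by
  have h := (List.subperm_of_subset hnd hk).length_le
  simpa [pvKeys] using h

theorem pv_fix_aux (bags : List (String × List String)) (quantities : List (String × List Int)) (S : List String) :
    ∀ (k : Nat), pvKStep bags quantities ((pvKStep bags quantities)^[k] S) = (pvKStep bags quantities)^[k] S ∨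
      S.length + k ≤ ((pvKStep bags quantities)^[k] S).length := by
  intro k
  induction k with
  | zero => exact Or.inr (by simp)
  | succ k ih =>
    rcases ih with ih | ih
    · left
      rw [Function.iterate_succ_apply', ih, ih]
    · obtain ⟨t, ht⟩ := pv_addNew_append ((pvKStep bags quantities)^[k] S)
        (((((pvKStep bags quantities)^[k] S).flatMap (pvChilds bags quantities)).filter (fun y => decide (y ∈ pvKeys bags))))
      have hst : pvKStep bags quantities ((pvKStep bags quantities)^[k] S) = (pvKStep bags quantities)^[k] S ++ t := ht
      cases t with
      | nil =>
        left
        rw [Function.iterate_succ_apply']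
        rw [hst]
        simp only [List.append_nil]
        rw [hst]
        simp
      | cons a t' =>
        right
        rw [Function.iterate_succ_apply', hst]
        simp only [List.length_append, List.length_cons]
        omega

theorem pv_fix (bags : List (String × List String)) (quantities : List (String × List Int)) (S : List String)
    (hnd : S.Nodup) (hk : S ⊆ pvKeys bags) :
    pvKStep bags quantities (pvKClose bags quantities S) = pvKClose bags quantities S := by
  rcases pv_fix_aux bags quantities S (bags.length + 1) with h | h
  · exact h
  · exfalso
    have h2 : ((pvKStep bags quantities)^[bags.length + 1] S).length ≤ bags.length :=
      pv_length_le bags _ (pv_iterate_nodup bags quantities _ S hnd) (pv_iterate_keys bags quantities _ S hk)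
    omega

theorem pv_closed_kclose (bags : List (String × List String)) (quantities : List (String × List Int)) (S : List String)
    (hnd : S.Nodup) (hk : S ⊆ pvKeys bags) : pvClosed bags quantities (pvKClose bags quantities S) := by
  intro x hx y hy hyk
  have : y ∈ pvKStep bags quantities (pvKClose bags quantities S) := by
    refine (pv_mem_addNew _ _ y).mpr (Or.inr ?_)
    simp only [List.mem_filter, List.mem_flatMap, decide_eq_true_eq]
    exact ⟨⟨x, hx, hy⟩, hyk⟩
  rwa [pv_fix bags quantities S hnd hk] at this

theorem pv_subset_kclose (bags : List (String × List String)) (quantities : List (String × List Int)) (S : List String) :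
    S ⊆ pvKClose bags quantities S :=
  pv_subset_iterate bags quantities _ S

theorem pv_kclose_minimal (bags : List (String × List String)) (quantities : List (String × List Int)) (S T : List String)
    (h : S ⊆ T) (hT : pvClosed bags quantities T) : pvKClose bags quantities S ⊆ T :=
  pv_iterate_subset bags quantities _ S T h hT

-- KC and down facts
theorem pv_KC_closed (bags : List (String × List String)) (quantities : List (String × List Int)) (bag : String) :
    pvClosed bags quantities (pvKC bags quantities bag) := by
  apply pv_closed_kclose
  · by_cases h : bag ∈ pvKeys bags <;> simp [h]
  · by_cases h : bag ∈ pvKeys bags <;> simp [h]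

theorem pv_mem_KC_self (bags : List (String × List String)) (quantities : List (String × List Int)) (bag : String)
    (h : bag ∈ pvKeys bags) : bag ∈ pvKC bags quantities bag := by
  apply pv_subset_kclose
  simp [h]

theorem pv_mem_down_self (bags : List (String × List String)) (quantities : List (String × List Int)) (x : String) :
    x ∈ pvDown bags quantities x :=
  pv_subset_kclose bags quantities [x] (by simp)

theorem pv_down_keys (bags : List (String × List String)) (quantities : List (String × List Int)) (x : String)
    (h : x ∈ pvKeys bags) : pvDown bags quantities x ⊆ pvKeys bags :=
  pv_iterate_keys bags quantities _ [x] (by simpa)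

theorem pv_down_nodup (bags : List (String × List String)) (quantities : List (String × List Int)) (x : String) :
    (pvDown bags quantities x).Nodup :=
  pv_iterate_nodup bags quantities _ [x] (by simp)

theorem pv_down_le (bags : List (String × List String)) (quantities : List (String × List Int)) (x : String)
    (h : x ∈ pvKeys bags) : (pvDown bags quantities x).length ≤ bags.length :=
  pv_length_le bags _ (pv_down_nodup bags quantities x) (pv_down_keys bags quantities x h)

theorem pv_down_closed (bags : List (String × List String)) (quantities : List (String × List Int)) (x : String)
    (h : x ∈ pvKeys bags) : pvClosed bags quantities (pvDown bags quantities x) :=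
  pv_closed_kclose bags quantities [x] (by simp) (by simpa)

theorem pv_down_pos (bags : List (String × List String)) (quantities : List (String × List Int)) (x : String) :
    1 ≤ (pvDown bags quantities x).length :=
  List.length_pos_of_mem (pv_mem_down_self bags quantities x)

theorem pv_down_lt (bags : List (String × List String)) (quantities : List (String × List Int)) (x y : String)
    (hx : x ∈ pvKeys bags) (hc : y ∈ pvChilds bags quantities x) (hyk : y ∈ pvKeys bags)
    (hnd : x ∉ pvDown bags quantities y) :
    (pvDown bags quantities y).length < (pvDown bags quantities x).length := by
  have hclx := pv_down_closed bags quantities x hx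
  have hxx := pv_mem_down_self bags quantities x
  have hyx : y ∈ pvDown bags quantities x := hclx x hxx y hc hyk
  have hsub : pvDown bags quantities y ⊆ pvDown bags quantities x :=
    pv_kclose_minimal bags quantities [y] _ (by simpa) hclx
  have hsub' : pvDown bags quantities y ⊆ (pvDown bags quantities x).erase x := by
    intro z hz
    have hzx : z ∈ pvDown bags quantities x := hsub hz
    have hne : z ≠ x := fun he => hnd (he ▸ hz)
    exact (List.mem_erase_of_ne hne).mpr hzx
  have h1 := (List.subperm_of_subset (pv_down_nodup bags quantities y) hsub').length_le
  have h2 := List.length_erase_of_mem hxx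
  have h3 := pv_down_pos bags quantities x
  omega

-- values of the ports
theorem pv_crf_of_not_key (bags : List (String × List String)) (quantities : List (String × List Int)) (x : String)
    (h : x ∉ pvKeys bags) (f : Nat) : pvCRF bags quantities f x = 0 := by
  cases f with
  | zero => rfl
  | succ f =>
    have hl : List.lookup x bags = none := (pv_lookup_eq_none_iff x bags).mpr (by simpa [pvKeys] using h)
    simp [pvCRF, hl]

theorem pv_childs_eq (bags : List (String × List String)) (quantities : List (String × List Int)) (x : String)
    (inners : List String) (h : List.lookup x bags = some inners) :
    pvChilds bags quantities x = ((((List.lookup x quantities).getD []).zip inners).map Prod.snd) := by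
  simp [pvChilds, h]

-- fuel irrelevance of the port of A under acyclicity
theorem pv_crf_fuel (bags : List (String × List String)) (quantities : List (String × List Int)) (bag : String)
    (hacyc : ∀ x ∈ pvKC bags quantities bag, ∀ y ∈ pvChilds bags quantities x, x ∉ pvDown bags quantities y) :
    ∀ (n : Nat) (x : String) (f : Nat),
      (x ∈ pvKeys bags → x ∈ pvKC bags quantities bag ∧ (pvDown bags quantities x).length ≤ n ∧ (pvDown bags quantities x).length ≤ f) →
      pvCRF bags quantities f x = pvCRF bags quantities (bags.length + 1) x := by
  intro n
  induction n using Nat.strong_induction_on with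
  | _ n ih =>
    intro x f hx
    by_cases hk : x ∈ pvKeys bags
    · obtain ⟨hKC, hdn, hdf⟩ := hx hk
      have h1 := pv_down_pos bags quantities x
      have hL := pv_down_le bags quantities x hk
      obtain ⟨f', rfl⟩ : ∃ f', f = f' + 1 := ⟨f - 1, by omega⟩
      obtain ⟨inners, hinn⟩ : ∃ inners, List.lookup x bags = some inners := by
        have := pv_lookup_isSome_of_mem x bags (by simpa [pvKeys] using hk)
        cases hl : List.lookup x bags with
        | none => rw [hl] at this; simp at this
        | some v => exact ⟨v, rfl⟩
      simp only [pvCRF, hinn]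
      congr 1
      apply List.map_congr_left
      intro p hp
      have hc : p.2 ∈ pvChilds bags quantities x := by
        rw [pv_childs_eq bags quantities x inners hinn]
        exact List.mem_map_of_mem hp
      by_cases hck : p.2 ∈ pvKeys bags
      · have hKCc : p.2 ∈ pvKC bags quantities bag := pv_KC_closed bags quantities bag x hKC p.2 hc hck
        have hlt := pv_down_lt bags quantities x p.2 hk hc hck (hacyc x hKC p.2 hc)
        have hcl := pv_down_le bags quantities p.2 hck
        have e1 := ih ((pvDown bags quantities p.2).length) (by omega) p.2 f'
          (fun _ => ⟨hKCc, le_refl _, by omega⟩)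
        have e2 := ih ((pvDown bags quantities p.2).length) (by omega) p.2 bags.length
          (fun _ => ⟨hKCc, le_refl _, hcl⟩)
        rw [e1, e2]
      · rw [pv_crf_of_not_key bags quantities p.2 hck, pv_crf_of_not_key bags quantities p.2 hck]
    · rw [pv_crf_of_not_key bags quantities x hk, pv_crf_of_not_key bags quantities x hk]

-- the memo invariant of the port of B
def pvGood (bags : List (String × List String)) (quantities : List (String × List Int)) (memo : PySem.Dict String Int) : Prop :=
  ∀ k v, PySem.Dict.get? memo k = some v → v = pvCRF bags quantities (bags.length + 1) k

theorem pv_good_insert (bags : List (String × List String)) (quantities : List (String × List Int))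
    (memo : PySem.Dict String Int) (b : String) (w : Int)
    (hg : pvGood bags quantities memo) (hw : w = pvCRF bags quantities (bags.length + 1) b) :
    pvGood bags quantities (memo.insert b w) := by
  intro k v hkv
  rw [PySem.Dict.get?_insert] at hkv
  by_cases hk : k = b
  · rw [if_pos hk] at hkv
    cases hkv
    rw [hw, hk]
  · rw [if_neg hk] at hkv
    exact hg k v hkv

theorem pv_go_correct (bags : List (String × List String)) (quantities : List (String × List Int)) (bag : String)
    (hacyc : ∀ x ∈ pvKC bags quantities bag, ∀ y ∈ pvChilds bags quantities x, x ∉ pvDown bags quantities y) :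
    ∀ (n : Nat) (b : String) (f : Nat) (memo : PySem.Dict String Int),
      pvGood bags quantities memo →
      (b ∈ pvKeys bags → b ∈ pvKC bags quantities bag ∧ (pvDown bags quantities b).length ≤ n ∧ (pvDown bags quantities b).length ≤ f) →
      pvGood bags quantities (pvGo bags quantities f b memo).1 ∧
        (pvGo bags quantities f b memo).2 = pvCRF bags quantities (bags.length + 1) b := by
  intro n
  induction n using Nat.strong_induction_on with
  | _ n ih =>
    intro b f memo hg hb
    cases hm : PySem.Dict.get? memo b with
    | some v =>
      rw [pvGo.eq_def, hm]
      exact ⟨hg, hg b v hm⟩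
    | none =>
      by_cases hk : b ∈ pvKeys bags
      · obtain ⟨hKC, hdn, hdf⟩ := hb hk
        have h1 := pv_down_pos bags quantities b
        have hL := pv_down_le bags quantities b hk
        obtain ⟨f', rfl⟩ : ∃ f', f = f' + 1 := ⟨f - 1, by omega⟩
        obtain ⟨inners, hinn⟩ : ∃ inners, List.lookup b bags = some inners := by
          have := pv_lookup_isSome_of_mem b bags (by simpa [pvKeys] using hk)
          cases hl : List.lookup b bags with
          | none => rw [hl] at this; simp at this
          | some v => exact ⟨v, rfl⟩
        have hloop : ∀ (l : List (Int × String)) (memo2 : PySem.Dict String Int) (total : Int),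
            pvGood bags quantities memo2 → (∀ p ∈ l, p.2 ∈ pvChilds bags quantities b) →
            pvGood bags quantities (pvGoLoop bags quantities f' l memo2 total).1 ∧
              (pvGoLoop bags quantities f' l memo2 total).2 =
                total + (l.map (fun p => p.1 + p.1 * pvCRF bags quantities (bags.length + 1) p.2)).sum := by
          intro l
          induction l with
          | nil => intro memo2 total hg2 _; rw [pvGoLoop.eq_def]; exact ⟨hg2, by simp⟩
          | cons p rest ihl =>
            intro memo2 total hg2 hch
            have hrec : pvGood bags quantities (pvGo bags quantities f' p.2 memo2).1 ∧
                (pvGo bags quantities f' p.2 memo2).2 = pvCRF bags quantities (bags.length + 1) p.2 := by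
              by_cases hck : p.2 ∈ pvKeys bags
              · have hc := hch p (List.mem_cons_self ..)
                have hKCc : p.2 ∈ pvKC bags quantities bag := pv_KC_closed bags quantities bag b hKC p.2 hc hck
                have hlt := pv_down_lt bags quantities b p.2 hk hc hck (hacyc b hKC p.2 hc)
                exact ih ((pvDown bags quantities p.2).length) (by omega) p.2 f' memo2 hg2
                  (fun _ => ⟨hKCc, le_refl _, by omega⟩)
              · exact ih 0 (by omega) p.2 f' memo2 hg2 (fun hc => absurd hc hck)
            obtain ⟨hg3, hv⟩ := hrec
            rw [pvGoLoop.eq_def]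
            obtain ⟨hg4, hv4⟩ := ihl (pvGo bags quantities f' p.2 memo2).1
              (total + (p.1 + p.1 * (pvGo bags quantities f' p.2 memo2).2)) hg3
              (fun q hq => hch q (List.mem_cons_of_mem p hq))
            refine ⟨hg4, ?_⟩
            rw [hv4, hv]
            simp [add_assoc]
        obtain ⟨hgr, hvr⟩ := hloop (((List.lookup b quantities).getD []).zip inners) memo 0 hg
          (by
            intro p hp
            rw [pv_childs_eq bags quantities b inners hinn]
            exact List.mem_map_of_mem hp)
        have hunf : pvCRF bags quantities (bags.length + 1) b =
            (List.map (fun p => p.1 + p.1 * pvCRF bags quantities bags.length p.2)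
              (((List.lookup b quantities).getD []).zip inners)).sum := by
          simp only [pvCRF, hinn]
        have hval : (pvGoLoop bags quantities f' (((List.lookup b quantities).getD []).zip inners) memo 0).2 =
            pvCRF bags quantities (bags.length + 1) b := by
          rw [hvr, zero_add, hunf]
          congr 1
          apply List.map_congr_left
          intro p hp
          have hc : p.2 ∈ pvChilds bags quantities b := by
            rw [pv_childs_eq bags quantities b inners hinn]
            exact List.mem_map_of_mem hp
          by_cases hck : p.2 ∈ pvKeys bags
          · have hKCc : p.2 ∈ pvKC bags quantities bag := pv_KC_closed bags quantities bag b hKC p.2 hc hck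
            have hcl := pv_down_le bags quantities p.2 hck
            have e := pv_crf_fuel bags quantities bag hacyc ((pvDown bags quantities p.2).length) p.2 bags.length
              (fun _ => ⟨hKCc, le_refl _, hcl⟩)
            rw [e]
          · rw [pv_crf_of_not_key bags quantities p.2 hck, pv_crf_of_not_key bags quantities p.2 hck]
        rw [pvGo, hm, hinn]
        exact ⟨pv_good_insert bags quantities _ b _ hgr hval, hval⟩
      · have hl : List.lookup b bags = none := (pv_lookup_eq_none_iff b bags).mpr (by simpa [pvKeys] using hk)
        cases f with
        | zero =>
          rw [pvGo.eq_def, hm]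
          exact ⟨hg, (pv_crf_of_not_key bags quantities b hk _).symm⟩
        | succ f' =>
          rw [pvGo, hm, hl]
          exact ⟨pv_good_insert bags quantities memo b 0 hg (pv_crf_of_not_key bags quantities b hk _).symm,
            (pv_crf_of_not_key bags quantities b hk _).symm⟩

-- ===== VERDICT (by name: the statement is the Claim_ definition above) =====
theorem countReduce_spec : Claim_equal_countReduce := by
  intro bag bags quantities _ hpre
  obtain ⟨_, hacyc⟩ := hpre
  have hgood : pvGood bags quantities PySem.Dict.empty := by
    intro k v hkv
    rw [PySem.Dict.get?_empty] at hkv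
    cases hkv
  have h := pv_go_correct bags quantities bag hacyc ((pvDown bags quantities bag).length) bag
    (bags.length + 1) PySem.Dict.empty hgood
    (fun hk => ⟨pv_mem_KC_self bags quantities bag hk, le_refl _, by
      have := pv_down_le bags quantities bag hk; omega⟩)
  unfold Spec_countReduce countReduce countReduce_alt
  exact h.2.symm
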